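-- pv_equiv track=rewrite | github.com/asragithubit/Computer_Networks_Assignments-SEF21- | CNAssignment.py | helper_AMI
-- ===== SOURCE A (Python) =====
-- def helper_AMI(bits):
--
--     amplitude=[]
--     prevAmplitude=-1
--     for bit in bits:
--         if bit=='0':
--             amplitude.append(0)
--         else:
--             if(prevAmplitude==1):
--                 amplitude.append(-1)
--                 prevAmplitude=-1
--             else:
--                 amplitude.append(1)
--                 prevAmplitude=1
--     return amplitude
-- ===== SOURCE B (Python) =====
-- def helper_AMI(bits):
--     bits = list(bits)
--     result = [0] * len(bits)
--     ones = [i for i, bit in enumerate(bits) if bit != '0']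
--     for j, idx in enumerate(ones):
--         result[idx] = 1 if j % 2 == 0 else -1
--     return result
-- ===== Notes on version B (the rewrite author's own statement) =====
-- stated objective: alternative
-- what changed: Replaces the running toggle flag with a positions-first decomposition: collect the indices of the pulse (non-zero) bits in one pass, then scatter plus/minus one into a zero-filled result by parity of each pulse's rank.
import Mathlib
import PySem

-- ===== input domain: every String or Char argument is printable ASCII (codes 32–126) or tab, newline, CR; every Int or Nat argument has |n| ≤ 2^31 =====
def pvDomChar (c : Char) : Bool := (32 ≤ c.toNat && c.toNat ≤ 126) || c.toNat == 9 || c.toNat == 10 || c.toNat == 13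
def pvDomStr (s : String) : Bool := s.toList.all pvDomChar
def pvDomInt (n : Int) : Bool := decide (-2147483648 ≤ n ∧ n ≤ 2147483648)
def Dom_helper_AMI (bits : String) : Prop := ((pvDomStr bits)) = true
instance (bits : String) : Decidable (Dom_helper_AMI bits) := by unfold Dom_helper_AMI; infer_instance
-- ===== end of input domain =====

-- B replaces A's running toggle flag with a positions-first decomposition (collect pulse
-- indices, scatter +1/-1 by rank parity); same cost, alternative structure.

-- ===== PORT A =====
def helper_AMI (bits : String) : List Int :=
  (bits.toList.foldl
    (fun (st : List Int × Int) bit =>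
      if bit = '0' then (st.1 ++ [0], st.2)
      else if st.2 = 1 then (st.1 ++ [-1], -1)
      else (st.1 ++ [1], 1))
    ([], -1)).1

-- ===== PORT B =====
def helper_AMI_alt (bits : String) : List Int :=
  let bs := bits.toList
  let result := List.replicate bs.length (0 : Int)
  let ones := (PySem.List.enumerate bs 0).filterMap
    (fun p => if p.2 ≠ '0' then some p.1 else none)
  (PySem.List.enumerate ones 0).foldl
    (fun res p => res.set p.2.toNat (if p.1 % 2 == 0 then (1 : Int) else -1))
    result

-- ===== PRECONDITION & SPEC =====
def Spec_helper_AMI (bits : String) (out : List Int) : Prop := out = helper_AMI_alt bits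
instance (bits : String) (out : List Int) : Decidable (Spec_helper_AMI bits out) := by unfold Spec_helper_AMI; infer_instance

-- ===== CLAIM (what is proved, stated in full; the proofs are below) =====
def Claim_equal_helper_AMI : Prop := ∀ (bits : String), Dom_helper_AMI bits → Spec_helper_AMI bits (helper_AMI bits)

-- ===== LEMMAS AND PROOFS =====

/-- Sign of the `j`-th pulse (rank parity). -/
def sgnP (j : Int) : Int := if j % 2 = 0 then 1 else -1

/-- Common characterisation: output of AMI encoding, carrying the rank of the next pulse. -/
def gSpec : List Char → Int → List Int
  | [], _ => []
  | c :: r, j => if c = '0' then 0 :: gSpec r j else sgnP j :: gSpec r (j + 1)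

/-- The scatter loop of B, with the rank carried explicitly. -/
def scatF : List Int → Int → List Int → List Int
  | [], _, init => init
  | i :: os, j, init => scatF os (j + 1) (init.set i.toNat (sgnP j))

/-- Indices of the non-'0' characters, as B computes them. -/
def onesF (cs : List Char) (s : Int) : List Int :=
  (PySem.List.enumerate cs s).filterMap (fun p => if p.2 ≠ '0' then some p.1 else none)

theorem onesF_nil (s : Int) : onesF [] s = [] := rfl

theorem onesF_cons (c : Char) (r : List Char) (s : Int) :
    onesF (c :: r) s = if c ≠ '0' then s :: onesF r (s + 1) else onesF r (s + 1) := by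
  simp only [onesF, PySem.List.enumerate_cons, List.filterMap_cons]
  split_ifs with h <;> simp

/-- B's fold over `enumerate ones` is `scatF`. -/
theorem foldl_enum_scat (os : List Int) (j : Int) (init : List Int) :
    (PySem.List.enumerate os j).foldl
      (fun res p => res.set p.2.toNat (if p.1 % 2 == 0 then (1 : Int) else -1)) init
    = scatF os j init := by
  induction os generalizing j init with
  | nil => rfl
  | cons i os ih =>
    simp only [PySem.List.enumerate_cons, List.foldl_cons, scatF, ih]
    congr 1
    simp [sgnP, beq_iff_eq]

/-- Scattering the pulse indices of `cs` (offset `s`) into zeros after a prefix `pre`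
    of length `s` produces `gSpec cs j`. -/
theorem scat_main (cs : List Char) (s j : Int) (hs : 0 ≤ s) (pre : List Int)
    (hpre : pre.length = s.toNat) :
    scatF (onesF cs s) j (pre ++ List.replicate cs.length 0) = pre ++ gSpec cs j := by
  induction cs generalizing s j pre with
  | nil => simp [onesF_nil, scatF, gSpec]
  | cons c r ih =>
    rw [onesF_cons]
    by_cases hc : c = '0'
    · simp only [hc, ne_eq, not_true_eq_false, if_false, gSpec]
      have := ih (s + 1) j (by omega) (pre ++ [0]) (by simp [hpre]; omega)
      simpa [List.replicate_succ, List.append_assoc] using this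
    · simp only [ne_eq, hc, not_false_eq_true, if_true, scatF, gSpec]
      have hlen : (c :: r).length = r.length + 1 := rfl
      have hset : (pre ++ List.replicate (r.length + 1) (0 : Int)).set s.toNat (sgnP j)
          = (pre ++ [sgnP j]) ++ List.replicate r.length 0 := by
        rw [List.set_append, if_neg (by omega), show s.toNat - pre.length = 0 by omega,
          List.replicate_succ]
        simp
      rw [hlen, hset]
      have := ih (s + 1) (j + 1) (by omega) (pre ++ [sgnP j]) (by simp [hpre]; omega)
      simpa [List.append_assoc] using this

/-- A's fold, with the toggle state expressed through the rank parity. -/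
theorem a_fold (cs : List Char) (acc : List Int) (j : Int) :
    (cs.foldl
      (fun (st : List Int × Int) bit =>
        if bit = '0' then (st.1 ++ [0], st.2)
        else if st.2 = 1 then (st.1 ++ [-1], -1)
        else (st.1 ++ [1], 1))
      (acc, if j % 2 = 0 then -1 else 1)).1 = acc ++ gSpec cs j := by
  induction cs generalizing acc j with
  | nil => simp [gSpec]
  | cons c r ih =>
    by_cases hc : c = '0'
    · simp only [List.foldl_cons, hc, gSpec]
      have h := ih (acc ++ [0]) j
      rw [List.append_assoc] at h
      simpa using h
    · by_cases hj : j % 2 = 0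
      · have hstate : ((if j % 2 = 0 then (-1 : Int) else 1)) = -1 := if_pos hj
        have h := ih (acc ++ [1]) (j + 1)
        rw [if_neg (show ¬((j + 1) % 2 = 0) by omega)] at h
        simp only [List.foldl_cons, hstate, if_neg hc, gSpec, sgnP, if_pos hj]
        norm_num
        simpa [List.append_assoc] using h
      · have hstate : ((if j % 2 = 0 then (-1 : Int) else 1)) = 1 := if_neg hj
        have h := ih (acc ++ [-1]) (j + 1)
        rw [if_pos (show (j + 1) % 2 = 0 by omega)] at h
        simp only [List.foldl_cons, hstate, if_neg hc, gSpec, sgnP, if_neg hj]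
        norm_num
        simpa [List.append_assoc] using h

-- ===== VERDICT (by name: the statement is the Claim_ definition above) =====
theorem helper_AMI_spec : Claim_equal_helper_AMI := by
  intro bits _
  unfold Spec_helper_AMI helper_AMI helper_AMI_alt
  rw [foldl_enum_scat]
  have hb := scat_main bits.toList 0 0 le_rfl [] rfl
  simp only [List.nil_append, onesF] at hb
  rw [hb]
  simpa using a_fold bits.toList [] 0
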